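-- pv_equiv track=rewrite | github.com/williamseddon/csat_dashboard | exporter.py | _set_ci_param
-- ===== SOURCE A (Python) =====
-- from typing import Any, Callable, Dict, List, Optional, Sequence, Tuple
--
-- def _set_ci_param(mapping: Dict[str, Any], candidates: Sequence[str], value: Any) -> str:
--     wanted = {str(candidate).lower() for candidate in candidates}
--     for key in list(mapping.keys()):
--         if str(key).lower() in wanted:
--             mapping[key] = value
--             return key
--     key = list(candidates)[0]
--     mapping[key] = value
--     return key
-- ===== SOURCE B (Python) =====
-- def _set_ci_param(mapping, candidates, value):
--     # Inverted index: lowercased key -> position of its first occurrence in the mapping.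
--     pos = {}
--     i = 0
--     for key in list(mapping.keys()):
--         pos.setdefault(str(key).lower(), i)
--         i += 1
--     # The first mapping key matching any candidate is the one with the minimal position.
--     best = None
--     for candidate in candidates:
--         j = pos.get(str(candidate).lower())
--         if j is not None:
--             if best is None or j < best:
--                 best = j
--     if best is not None:
--         key = list(mapping.keys())[best]
--         mapping[key] = value
--         return key
--     key = list(candidates)[0]
--     mapping[key] = value
--     return key
-- ===== Notes on version B (the rewrite author's own statement) =====
-- stated objective: alternative
-- what changed: Instead of scanning the mapping keys against a candidate set, B builds an inverted index (lowercased key -> first position) in one pass, then takes the minimum indexed position over the candidates and returns the key at that position; same first-match/fallback behaviour and the same mutation of mapping.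
import Mathlib
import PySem

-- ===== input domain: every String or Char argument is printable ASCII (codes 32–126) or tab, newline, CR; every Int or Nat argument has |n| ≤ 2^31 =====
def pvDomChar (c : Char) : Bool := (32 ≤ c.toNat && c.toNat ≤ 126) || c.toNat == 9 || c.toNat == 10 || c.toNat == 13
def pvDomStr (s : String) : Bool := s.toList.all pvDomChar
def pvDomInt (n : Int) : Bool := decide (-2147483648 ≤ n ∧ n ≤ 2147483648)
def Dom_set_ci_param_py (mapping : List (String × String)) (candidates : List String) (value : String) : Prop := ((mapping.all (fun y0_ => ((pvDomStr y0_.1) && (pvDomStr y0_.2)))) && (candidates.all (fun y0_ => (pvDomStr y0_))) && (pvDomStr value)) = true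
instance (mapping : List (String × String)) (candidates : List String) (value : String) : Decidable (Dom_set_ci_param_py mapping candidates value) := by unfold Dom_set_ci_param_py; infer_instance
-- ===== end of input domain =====

-- B replaces A's key scan against a lowercased candidate set by an inverted index
-- (lowercased key -> first position) plus an index-minimum over the candidates (alternative
-- decomposition, same cost); both mutate `mapping` identically, and the equivalence proved
-- here is about the RETURN value.

-- ===== PORT A =====
-- the 'for key in list(mapping.keys())' loop of A: first key whose lowercase form is in `wanted`
def setCiLoopA (wanted : PySem.Set String) (keys : List String) : Option String :=
  match keys with
  | [] => none
  | k :: rest => if PySem.Set.contains wanted (PySem.Str.lower k) then some k else setCiLoopA wanted rest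

def set_ci_param_py (mapping : List (String × String)) (candidates : List String) (value : String) : String :=
  let wanted : PySem.Set String := PySem.Set.ofList (candidates.map PySem.Str.lower)
  match setCiLoopA wanted (mapping.map Prod.fst) with
  | some k => k
  | none => candidates.headI   -- list(candidates)[0]; Pre_ guarantees candidates ≠ []

-- ===== PORT B =====
-- Source B's first loop: pos.setdefault(str(key).lower(), i) for i, key over the mapping keys
def posLoop (d : PySem.Dict String Int) (i : Int) (keys : List String) : PySem.Dict String Int :=
  match keys with
  | [] => d
  | k :: rest =>
      let d' := match PySem.Dict.get? d (PySem.Str.lower k) with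
                | some _ => d
                | none => PySem.Dict.insert d (PySem.Str.lower k) i
      posLoop d' (i + 1) rest

-- Source B's second loop: running minimum of pos.get(str(candidate).lower()) over the candidates
def bestLoop (pos : PySem.Dict String Int) (best : Option Int) (cs : List String) : Option Int :=
  match cs with
  | [] => best
  | c :: rest =>
      let best' := match PySem.Dict.get? pos (PySem.Str.lower c) with
                   | none => best
                   | some j => match best with
                               | none => some j
                               | some b => if j < b then some j else best
      bestLoop pos best' rest

def set_ci_param_py_alt (mapping : List (String × String)) (candidates : List String) (value : String) : String :=
  let keys := mapping.map Prod.fst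
  let pos := posLoop PySem.Dict.empty 0 keys
  match bestLoop pos none candidates with
  | some i => (PySem.List.pyGet? keys i).getD ""   -- list(mapping.keys())[best]; index always in range here
  | none => candidates.headI                       -- list(candidates)[0]; Pre_ guarantees candidates ≠ []

-- ===== PRECONDITION & SPEC =====
-- Pre_ excludes candidates = []: there A never finds a key (the wanted set is empty) and
-- list(candidates)[0] raises IndexError (B raises there too).
def Pre_set_ci_param_py (mapping : List (String × String)) (candidates : List String) (value : String) : Prop := candidates ≠ []
instance (mapping : List (String × String)) (candidates : List String) (value : String) : Decidable (Pre_set_ci_param_py mapping candidates value) := by unfold Pre_set_ci_param_py; infer_instance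

def pvWitness_set_ci_param_py : (List (String × String)) × List String × String := ([("Score", "1"), ("id", "7")], ["ID", "key"], "9")

def Spec_set_ci_param_py (mapping : List (String × String)) (candidates : List String) (value : String) (out : String) : Prop := out = set_ci_param_py_alt mapping candidates value
instance (mapping : List (String × String)) (candidates : List String) (value : String) (out : String) : Decidable (Spec_set_ci_param_py mapping candidates value out) := by unfold Spec_set_ci_param_py; infer_instance

-- ===== CLAIM (what is proved, stated in full; the proofs are below) =====
def Claim_equal_set_ci_param_py : Prop := ∀ (mapping : List (String × String)) (candidates : List String) (value : String), Dom_set_ci_param_py mapping candidates value → Pre_set_ci_param_py mapping candidates value → Spec_set_ci_param_py mapping candidates value (set_ci_param_py mapping candidates value)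

-- ===== LEMMAS AND PROOFS =====

-- first index (from offset i) of a key whose lowercase form is s
def fIdx (i : Int) (keys : List String) (s : String) : Option Int :=
  match keys with
  | [] => none
  | k :: rest => if PySem.Str.lower k == s then some i else fIdx (i + 1) rest s

-- first index (from offset i) of a key whose lowercase form matches some candidate
def firstHit (cs : List String) (i : Int) (keys : List String) : Option Int :=
  match keys with
  | [] => none
  | k :: rest =>
      if cs.any (fun c => PySem.Str.lower k == PySem.Str.lower c) then some i
      else firstHit cs (i + 1) rest

-- the option-minimum combinator realised by Source B's second loop
def omin (a b : Option Int) : Option Int :=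
  match a, b with
  | none, b => b
  | a, none => a
  | some x, some y => some (min x y)

-- structural version of bestLoop
def mList (pos : PySem.Dict String Int) (cs : List String) : Option Int :=
  match cs with
  | [] => none
  | c :: rest => omin (PySem.Dict.get? pos (PySem.Str.lower c)) (mList pos rest)

theorem omin_assoc (a b c : Option Int) : omin (omin a b) c = omin a (omin b c) := by
  cases a <;> cases b <;> cases c <;> simp [omin, min_assoc]

theorem bestLoop_eq_omin_mList (pos : PySem.Dict String Int) (cs : List String) (b : Option Int) :
    bestLoop pos b cs = omin b (mList pos cs) := by
  induction cs generalizing b with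
  | nil => cases b <;> rfl
  | cons c rest ih =>
      have hstep : bestLoop pos b (c :: rest)
          = bestLoop pos (omin b (PySem.Dict.get? pos (PySem.Str.lower c))) rest := by
        cases hg : PySem.Dict.get? pos (PySem.Str.lower c) with
        | none => cases b <;> simp [bestLoop, hg, omin]
        | some j =>
            cases b with
            | none => simp [bestLoop, hg, omin]
            | some x =>
                by_cases h : j < x
                · simp [bestLoop, hg, omin, h, min_comm, min_eq_left (le_of_lt h)]
                · simp [bestLoop, hg, omin, h, min_eq_left (not_lt.mp h)]
      rw [hstep, ih]
      simp only [mList]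
      exact omin_assoc b _ _

-- the dict built by posLoop answers with fIdx (existing entries win: setdefault)
theorem get?_posLoop (keys : List String) (d : PySem.Dict String Int) (i : Int) (s : String) :
    PySem.Dict.get? (posLoop d i keys) s
      = ((PySem.Dict.get? d s).or (fIdx i keys s)) := by
  induction keys generalizing d i with
  | nil => simp [posLoop, fIdx]
  | cons k rest ih =>
      simp only [posLoop, fIdx]
      cases hk : PySem.Dict.get? d (PySem.Str.lower k) with
      | some v =>
          rw [ih]
          by_cases hs : PySem.Str.lower k == s
          · have : s = PySem.Str.lower k := (beq_iff_eq.mp hs).symm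
            subst this
            simp [hk]
          · simp [hs]
      | none =>
          rw [ih]
          by_cases hs : PySem.Str.lower k == s
          · have : s = PySem.Str.lower k := (beq_iff_eq.mp hs).symm
            subst this
            simp [PySem.Dict.get?_insert_self, hk]
          · have hne : s ≠ PySem.Str.lower k := fun h => hs (beq_iff_eq.mpr h.symm)
            simp [PySem.Dict.get?_insert_of_ne _ _ hne, hs]

theorem fIdx_ge (keys : List String) (s : String) (i n : Int) (h : fIdx i keys s = some n) : i ≤ n := by
  induction keys generalizing i with
  | nil => simp [fIdx] at h
  | cons k rest ih =>
      simp only [fIdx] at h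
      split at h
      · simp at h; omega
      · have := ih (i + 1) h; omega

theorem firstHit_ge (cs : List String) (keys : List String) (i n : Int)
    (h : firstHit cs i keys = some n) : i ≤ n := by
  induction keys generalizing i with
  | nil => simp [firstHit] at h
  | cons k rest ih =>
      simp only [firstHit] at h
      split at h
      · simp at h; omega
      · have := ih (i + 1) h; omega

theorem mList_ge (keys : List String) (cs : List String) (i : Int) :
    ∀ n, mList (posLoop PySem.Dict.empty i keys) cs = some n → i ≤ n := by
  induction cs with
  | nil => intro n h; simp [mList] at h
  | cons c rest ih =>
      intro n h
      simp only [mList] at h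
      cases hg : PySem.Dict.get? (posLoop PySem.Dict.empty i keys) (PySem.Str.lower c) with
      | none =>
          rw [hg] at h
          cases hr : mList (posLoop PySem.Dict.empty i keys) rest with
          | none => rw [hr] at h; simp [omin] at h
          | some m => rw [hr] at h; simp [omin] at h; subst h; exact ih m hr
      | some j =>
          have hj : fIdx i keys (PySem.Str.lower c) = some j := by
            have := get?_posLoop keys PySem.Dict.empty i (PySem.Str.lower c)
            rw [hg] at this; simpa [PySem.Dict.get?_empty] using this.symm
          have hij : i ≤ j := fIdx_ge keys _ i j hj
          rw [hg] at h
          cases hr : mList (posLoop PySem.Dict.empty i keys) rest with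
          | none => rw [hr] at h; simp [omin] at h; omega
          | some m =>
              rw [hr] at h; simp [omin] at h
              have := ih m hr
              omega

-- the central fact: the minimum over candidates of first-occurrence indices IS the
-- index of the first key matching some candidate
theorem mList_eq_firstHit (keys : List String) (cs : List String) (i : Int) :
    mList (posLoop PySem.Dict.empty i keys) cs = firstHit cs i keys := by
  induction keys generalizing i with
  | nil =>
      have hnone : ∀ cs', mList PySem.Dict.empty cs' = none := by
        intro cs'
        induction cs' with
        | nil => rfl
        | cons c rest ih => simp [mList, PySem.Dict.get?_empty, omin, ih]
      simp [firstHit, posLoop, hnone]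
  | cons k rest ih =>
      by_cases hany : cs.any (fun c => PySem.Str.lower k == PySem.Str.lower c)
      · -- some candidate matches the head key: the minimum is i
        rw [firstHit]
        simp only [hany, if_true]
        -- every value in the index is ≥ i, and some candidate yields exactly i
        rcases List.any_eq_true.mp hany with ⟨c0, hc0, he0⟩
        have hlow : PySem.Str.lower c0 = PySem.Str.lower k := (beq_iff_eq.mp he0).symm
        have hget : PySem.Dict.get? (posLoop PySem.Dict.empty i (k :: rest)) (PySem.Str.lower c0) = some i := by
          rw [get?_posLoop]
          simp [PySem.Dict.get?_empty, fIdx, hlow]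
        -- induction over the candidate list, keeping the witness
        clear hany ih
        induction cs with
        | nil => cases hc0
        | cons c cs' ihc =>
            simp only [mList]
            rcases List.mem_cons.mp hc0 with h | h
            · subst h
              rw [hget]
              cases hr : mList (posLoop PySem.Dict.empty i (k :: rest)) cs' with
              | none => simp [omin]
              | some m =>
                  have := mList_ge (k :: rest) cs' i m hr
                  simp [omin]; omega
            · rw [ihc h]
              cases hg : PySem.Dict.get? (posLoop PySem.Dict.empty i (k :: rest)) (PySem.Str.lower c) with
              | none => simp [omin]
              | some j =>
                  have hj : fIdx i (k :: rest) (PySem.Str.lower c) = some j := by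
                    have := get?_posLoop (k :: rest) PySem.Dict.empty i (PySem.Str.lower c)
                    rw [hg] at this; simpa [PySem.Dict.get?_empty] using this.symm
                  have hij : i ≤ j := fIdx_ge _ _ i j hj
                  simp [omin]; omega
      · -- no candidate matches the head key: shift by one and use the IH on rest
        simp only [Bool.not_eq_true] at hany
        rw [firstHit]
        simp only [hany, Bool.false_eq_true, if_false]
        rw [← ih (i + 1)]
        -- the head key contributes nothing to the index: posLoop over k::rest from i
        -- equals posLoop over rest from i+1 on every candidate's query
        have hq : ∀ c ∈ cs,
            PySem.Dict.get? (posLoop PySem.Dict.empty i (k :: rest)) (PySem.Str.lower c)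
              = PySem.Dict.get? (posLoop PySem.Dict.empty (i + 1) rest) (PySem.Str.lower c) := by
          intro c hc
          have hne : (PySem.Str.lower k == PySem.Str.lower c) = false := by
            have := List.any_eq_false.mp hany c hc
            simpa using this
          rw [get?_posLoop, get?_posLoop]
          simp [PySem.Dict.get?_empty, fIdx, hne]
        clear hany ih
        induction cs with
        | nil => rfl
        | cons c cs' ihc =>
            simp only [mList]
            rw [hq c (List.mem_cons_self), ihc (fun c' hc' => hq c' (List.mem_cons_of_mem _ hc'))]

-- A's loop returns the key at the firstHit index
theorem setCiLoopA_eq_firstHit (cs : List String) (keys : List String) :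
    setCiLoopA (PySem.Set.ofList (cs.map PySem.Str.lower)) keys
      = (firstHit cs 0 keys).bind (fun i => PySem.List.pyGet? keys i) := by
  -- generalized over the offset: firstHit from offset i, indexing shifted
  suffices h : ∀ keys i, 0 ≤ i →
      setCiLoopA (PySem.Set.ofList (cs.map PySem.Str.lower)) keys
        = (firstHit cs i keys).bind (fun j => PySem.List.pyGet? keys (j - i)) by
    simpa using h keys 0 le_rfl
  intro keys
  induction keys with
  | nil => intro i _; rfl
  | cons k rest ih =>
      intro i hi
      have hcond : PySem.Set.contains (PySem.Set.ofList (cs.map PySem.Str.lower)) (PySem.Str.lower k)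
          = cs.any (fun c => PySem.Str.lower k == PySem.Str.lower c) := by
        rw [Bool.eq_iff_iff]
        constructor
        · intro h
          have hm : PySem.Str.lower k ∈ cs.map PySem.Str.lower := by
            simpa [PySem.Set.contains, PySem.Set.mem_ofList] using h
          rcases List.mem_map.mp hm with ⟨c, hc, hl⟩
          exact List.any_eq_true.mpr ⟨c, hc, beq_iff_eq.mpr hl.symm⟩
        · intro h
          rcases List.any_eq_true.mp h with ⟨c, hc, he⟩
          have : PySem.Str.lower k ∈ cs.map PySem.Str.lower :=
            List.mem_map.mpr ⟨c, hc, (beq_iff_eq.mp he).symm⟩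
          simpa [PySem.Set.contains, PySem.Set.mem_ofList] using this
      simp only [setCiLoopA, firstHit, hcond]
      by_cases hany : cs.any (fun c => PySem.Str.lower k == PySem.Str.lower c)
      · simp [hany, PySem.List.pyGet?_zero_cons]
      · simp only [hany, if_false, Bool.false_eq_true]
        rw [ih (i + 1) (by omega)]
        cases hf : firstHit cs (i + 1) rest with
        | none => simp
        | some j =>
            have hji : i + 1 ≤ j := firstHit_ge cs rest (i + 1) j hf
            have : j - i = (j - i - 1) + 1 := by omega
            simp only [Option.bind_some]
            rw [this]
            obtain ⟨n, hn⟩ : ∃ n : Nat, (j - i - 1) = (n : Int) := ⟨(j - i - 1).toNat, by omega⟩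
            rw [hn, PySem.List.pyGet?_cons_succ]
            congr 1
            omega

-- firstHit indices are valid list positions
theorem firstHit_pyGet_shift (cs : List String) (keys : List String) :
    ∀ (i j : Int), firstHit cs i keys = some j →
      ∃ k, PySem.List.pyGet? keys (j - i) = some k := by
  induction keys with
  | nil => intro i j h; simp [firstHit] at h
  | cons k rest ih =>
      intro i j h
      simp only [firstHit] at h
      split at h
      · simp at h
        subst h
        exact ⟨k, by simp [show i - i = (0 : Int) by omega]⟩
      · obtain ⟨k', hk'⟩ := ih (i + 1) j h
        have hji : i + 1 ≤ j := firstHit_ge cs rest (i + 1) j h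
        refine ⟨k', ?_⟩
        have hsplit : j - i = (j - (i + 1)) + 1 := by omega
        rw [hsplit]
        obtain ⟨n, hn⟩ : ∃ n : Nat, j - (i + 1) = (n : Int) := ⟨(j - (i + 1)).toNat, by omega⟩
        rw [hn] at hk' ⊢
        rw [PySem.List.pyGet?_cons_succ]
        exact hk'

theorem firstHit_pyGet (cs : List String) (keys : List String) (i : Int)
    (h : firstHit cs 0 keys = some i) : ∃ k, PySem.List.pyGet? keys i = some k := by
  simpa using firstHit_pyGet_shift cs keys 0 i h

-- ===== VERDICT (by name: the statement is the Claim_ definition above) =====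
theorem set_ci_param_py_spec : Claim_equal_set_ci_param_py := by
  intro mapping candidates value _dom _pre
  unfold Spec_set_ci_param_py set_ci_param_py set_ci_param_py_alt
  simp only [bestLoop_eq_omin_mList, mList_eq_firstHit, setCiLoopA_eq_firstHit]
  cases hf : firstHit candidates 0 (mapping.map Prod.fst) with
  | none => simp [omin]
  | some i =>
      obtain ⟨k, hk⟩ := firstHit_pyGet candidates (mapping.map Prod.fst) i hf
      simp [omin, hk]
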